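-- pv_equiv track=rewrite | github.com/jdolivet/ISN-Cours | Cours 2019/07-3-tuples.py | chercheDiviseursExtremes
-- ===== SOURCE A (Python) =====
-- def chercheDiviseursExtremes(n1, n2):
--     """On suppose que n1 et n2 sont des entiers positifs
--     Retourne un tuple contenant le plus petit diviseur commun autre que un
--     et le PGCD"""
--     minVal, maxVal = None, None
--     for i in range(2, min(n1, n2) + 1):
--         if n1 % i == 0 and n2 % i == 0:
--             if minVal == None or i < minVal:
--                 minVal = i
--             if maxVal == None or i > maxVal:
--                 maxVal = i
--     return (minVal, maxVal)
-- ===== SOURCE B (Python) =====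
-- def chercheDiviseursExtremes(n1, n2):
--     """On suppose que n1 et n2 sont des entiers positifs
--     Retourne un tuple contenant le plus petit diviseur commun autre que un
--     et le PGCD"""
--     if min(n1, n2) < 2:
--         return (None, None)
--     a, b = n1, n2
--     while b:
--         a, b = b, a % b
--     g = a
--     if g == 1:
--         return (None, None)
--     d = 2
--     while d * d <= g:
--         if g % d == 0:
--             return (d, g)
--         d += 1
--     return (g, g)
-- ===== Notes on version B (the rewrite author's own statement) =====
-- stated objective: faster
-- what changed: A scans every i in [2, min(n1,n2)] testing divisibility of both numbers and tracking min/max; B computes the gcd with Euclid's algorithm and then finds the smallest nontrivial divisor of the gcd by trial division up to its square root.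
import Mathlib
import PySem

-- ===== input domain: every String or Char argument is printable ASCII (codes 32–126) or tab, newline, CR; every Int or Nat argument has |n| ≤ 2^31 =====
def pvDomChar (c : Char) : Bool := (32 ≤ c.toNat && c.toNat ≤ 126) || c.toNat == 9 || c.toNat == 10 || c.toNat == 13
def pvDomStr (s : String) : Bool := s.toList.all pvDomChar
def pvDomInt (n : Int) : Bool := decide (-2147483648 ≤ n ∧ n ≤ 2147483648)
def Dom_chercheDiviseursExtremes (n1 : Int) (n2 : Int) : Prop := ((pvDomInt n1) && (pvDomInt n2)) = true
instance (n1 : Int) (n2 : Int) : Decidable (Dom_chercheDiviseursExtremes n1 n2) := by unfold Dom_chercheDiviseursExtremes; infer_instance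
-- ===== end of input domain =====

-- B replaces A's O(min(n1,n2)) scan by Euclid's gcd plus trial division to √gcd (asymptotically faster).


-- ===== PORT A =====
-- one iteration of A's for-loop body (state = (minVal, maxVal))
def pvStepA (n1 n2 : Int) (st : Option Int × Option Int) (i : Int) : Option Int × Option Int :=
  if PySem.Int.mod n1 i = 0 ∧ PySem.Int.mod n2 i = 0 then
    (match st.1 with | none => some i | some v => if i < v then some i else some v,
     match st.2 with | none => some i | some v => if v < i then some i else some v)
  else st

def chercheDiviseursExtremes (n1 : Int) (n2 : Int) : List (Option Int) :=
  let r := (PySem.List.pyRange 2 (min n1 n2 + 1) 1).foldl (pvStepA n1 n2) (none, none)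
  [r.1, r.2]

-- ===== PORT B =====
-- `while b: a, b = b, a % b` (Euclid); terminates since |a % b| < |b| for b ≠ 0
def pvEuclid (a b : Int) : Int :=
  if h : b = 0 then a
  else pvEuclid b (PySem.Int.mod a b)
termination_by b.natAbs
decreasing_by
  rcases lt_trichotomy b 0 with hb | hb | hb
  · have := PySem.Int.mod_neg_bounds (a := a) hb
    omega
  · exact absurd hb h
  · have h1 := PySem.Int.mod_nonneg (a := a) hb
    have h2 := PySem.Int.mod_lt (a := a) hb
    omega

-- `d = 2; while d*d <= g: …` trial-division loop of Source B
def pvTrial (g d : Int) : Option Int × Option Int :=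
  if h : d * d ≤ g then
    if PySem.Int.mod g d = 0 then (some d, some g)
    else pvTrial g (d + 1)
  else (some g, some g)
termination_by (g - d).toNat
decreasing_by
  rename_i hmod
  have hnd : ¬ d ∣ g := fun hd => hmod ((PySem.Int.mod_eq_zero_iff_dvd g d).mpr hd)
  have : d < g := by
    rcases lt_trichotomy d 0 with hneg | hz | hpos
    · have hsq : 0 < d * d := mul_pos_of_neg_of_neg hneg hneg
      omega
    · subst hz
      have hg : g ≠ 0 := fun e => hnd (by rw [e])
      omega
    · have hd1 : d ≠ 1 := fun e => hnd (e ▸ one_dvd g)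
      have : 2 ≤ d := by omega
      nlinarith
  omega

def chercheDiviseursExtremes_alt (n1 : Int) (n2 : Int) : List (Option Int) :=
  if min n1 n2 < 2 then [none, none]
  else
    let g := pvEuclid n1 n2
    if g = 1 then [none, none]
    else
      let r := pvTrial g 2
      [r.1, r.2]

-- ===== PRECONDITION & SPEC =====
def Spec_chercheDiviseursExtremes (n1 : Int) (n2 : Int) (out : List (Option Int)) : Prop := out = chercheDiviseursExtremes_alt n1 n2
instance (n1 : Int) (n2 : Int) (out : List (Option Int)) : Decidable (Spec_chercheDiviseursExtremes n1 n2 out) := by unfold Spec_chercheDiviseursExtremes; infer_instance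

-- ===== CLAIM (what is proved, stated in full; the proofs are below) =====
def Claim_equal_chercheDiviseursExtremes : Prop := ∀ (n1 : Int) (n2 : Int), Dom_chercheDiviseursExtremes n1 n2 → Spec_chercheDiviseursExtremes n1 n2 (chercheDiviseursExtremes n1 n2)

-- ===== LEMMAS AND PROOFS =====


-- every common divisor is a divisor of the gcd and conversely
theorem pv_dvd_gcd_iff (n1 n2 i : Int) : i ∣ (Int.gcd n1 n2 : Int) ↔ i ∣ n1 ∧ i ∣ n2 := by
  constructor
  · intro h; exact ⟨h.trans (Int.gcd_dvd_left _ _), h.trans (Int.gcd_dvd_right _ _)⟩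
  · intro ⟨h1, h2⟩
    have hn : i.natAbs ∣ Int.gcd n1 n2 :=
      Int.dvd_gcd (Int.natAbs_dvd.mpr h1) (Int.natAbs_dvd.mpr h2)
    exact Int.natAbs_dvd.mp (Int.natCast_dvd_natCast.mpr hn)

-- A's fold over a strictly increasing list returns (first match, last match)
theorem pv_foldA_char (n1 n2 : Int) (l : List Int) (hl : l.Pairwise (· < ·)) :
    l.foldl (pvStepA n1 n2) (none, none)
      = (l.find? (fun i => decide (PySem.Int.mod n1 i = 0 ∧ PySem.Int.mod n2 i = 0)),
         l.reverse.find? (fun i => decide (PySem.Int.mod n1 i = 0 ∧ PySem.Int.mod n2 i = 0))) := by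
  induction l using List.reverseRecOn with
  | nil => simp
  | append_singleton l b ih =>
    have hlb : ∀ x ∈ l, x < b := by
      intro x hx
      have := (List.pairwise_append.mp hl).2.2
      exact this x hx b (by simp)
    have hl' : l.Pairwise (· < ·) := (List.pairwise_append.mp hl).1
    rw [List.foldl_append, ih hl', List.find?_append, List.reverse_append]
    simp only [List.reverse_singleton, List.singleton_append, List.foldl_cons, List.foldl_nil]
    by_cases hb : PySem.Int.mod n1 b = 0 ∧ PySem.Int.mod n2 b = 0
    · have hCb : (fun i => decide (PySem.Int.mod n1 i = 0 ∧ PySem.Int.mod n2 i = 0)) b = true := by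
        simpa using hb
      rw [List.find?_cons_of_pos (p := fun i => decide (PySem.Int.mod n1 i = 0 ∧ PySem.Int.mod n2 i = 0)) hCb,
          List.find?_cons_of_pos (p := fun i => decide (PySem.Int.mod n1 i = 0 ∧ PySem.Int.mod n2 i = 0)) hCb]
      cases hfind : l.find? (fun i => decide (PySem.Int.mod n1 i = 0 ∧ PySem.Int.mod n2 i = 0)) with
      | none =>
        have hrfind : l.reverse.find? (fun i => decide (PySem.Int.mod n1 i = 0 ∧ PySem.Int.mod n2 i = 0)) = none := by
          rw [List.find?_eq_none] at hfind ⊢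
          intro x hx; exact hfind x (by simpa using hx)
        rw [hrfind]
        unfold pvStepA
        rw [if_pos hb]
        simp
      | some v =>
        have hv : v ∈ l := List.mem_of_find?_eq_some hfind
        have hvb : v < b := hlb v hv
        have hCv := List.find?_some hfind
        obtain ⟨w, hrfind⟩ :
            ∃ w, l.reverse.find? (fun i => decide (PySem.Int.mod n1 i = 0 ∧ PySem.Int.mod n2 i = 0)) = some w := by
          cases hr : l.reverse.find? (fun i => decide (PySem.Int.mod n1 i = 0 ∧ PySem.Int.mod n2 i = 0)) with
          | none =>
            exfalso
            rw [List.find?_eq_none] at hr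
            exact absurd hCv (by simpa using hr v (by simpa using hv))
          | some w => exact ⟨w, rfl⟩
        have hw : w ∈ l := by simpa using List.mem_of_find?_eq_some hrfind
        have hwb : w < b := hlb w hw
        rw [hrfind]
        unfold pvStepA
        rw [if_pos hb]
        simp [show ¬ b < v from by omega, hwb]
    · have hCb : ¬ (fun i => decide (PySem.Int.mod n1 i = 0 ∧ PySem.Int.mod n2 i = 0)) b = true := by
        simpa using hb
      rw [List.find?_cons_of_neg (p := fun i => decide (PySem.Int.mod n1 i = 0 ∧ PySem.Int.mod n2 i = 0)) hCb,
          List.find?_cons_of_neg (p := fun i => decide (PySem.Int.mod n1 i = 0 ∧ PySem.Int.mod n2 i = 0)) hCb]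
      unfold pvStepA
      rw [if_neg hb]
      simp

-- find? over an ascending integer range hits g when everything before g fails
theorem pv_find_asc (C : Int → Bool) (m g : Int) (hgm : g ≤ m) (hC : C g = true)
    (d : Int) (hdg : d ≤ g)
    (hfail : ∀ i, d ≤ i → i < g → C i = false) :
    (PySem.List.pyRange d (m + 1) 1).find? C = some g := by
  have hk : (g - d).toNat = (g - d).toNat := rfl
  generalize hgen : (g - d).toNat = k at hk
  clear hk
  induction k generalizing d with
  | zero =>
    have : d = g := by omega
    subst this
    rw [PySem.List.pyRange_one_cons (by omega)]
    simp [List.find?, hC]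
  | succ k ih =>
    have hdg' : d < g := by omega
    rw [PySem.List.pyRange_one_cons (by omega)]
    rw [List.find?_cons, hfail d le_rfl hdg']
    exact ih (d + 1) (by omega) (fun i h1 h2 => hfail i (by omega) h2) (by omega)

-- find? over a descending integer range m, m-1, …, 2 hits g when everything above g fails
theorem pv_find_desc (C : Int → Bool) (g : Int) (hg : 1 < g) (hC : C g = true)
    (a : Int) (hga : g ≤ a)
    (hfail : ∀ i, g < i → i ≤ a → C i = false) :
    (PySem.List.pyRange a 1 (-1)).find? C = some g := by
  have hk : (a - g).toNat = (a - g).toNat := rfl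
  generalize hgen : (a - g).toNat = k at hk
  clear hk
  induction k generalizing a with
  | zero =>
    have : a = g := by omega
    subst this
    rw [PySem.List.pyRange_neg_one_cons (by omega)]
    simp [List.find?, hC]
  | succ k ih =>
    have hga' : g < a := by omega
    rw [PySem.List.pyRange_neg_one_cons (by omega)]
    rw [List.find?_cons, hfail a hga' le_rfl]
    exact ih (a - 1) (by omega) (fun i h1 h2 => hfail i h1 (by omega)) (by omega)

-- the hand-written Euclid loop computes the gcd on nonnegative inputs
theorem pv_euclid_eq_gcd (a b : Int) (ha : 0 ≤ a) (hb : 0 ≤ b) :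
    pvEuclid a b = (Int.gcd a b : Int) := by
  have hk : b.natAbs = b.natAbs := rfl
  generalize hgen : b.natAbs = k at hk
  clear hk
  induction k using Nat.strong_induction_on generalizing a b with
  | _ k ih =>
    rw [pvEuclid]
    by_cases h0 : b = 0
    · rw [dif_pos h0, h0]
      simp [Int.gcd, Int.natAbs_of_nonneg ha]
    · rw [dif_neg h0]
      have hbpos : 0 < b := by omega
      have hmod : PySem.Int.mod a b = a % b := PySem.Int.mod_eq_emod_of_pos hbpos
      have hmn : 0 ≤ a % b := Int.emod_nonneg a h0
      have hml : a % b < b := Int.emod_lt_of_pos a hbpos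
      rw [hmod]
      rw [ih (a % b).natAbs (by omega) b (a % b) (by omega) hmn rfl]
      have h1 : a % b = a - b * (a / b) := by rw [Int.emod_def]
      rw [h1, Int.gcd_sub_mul_left_right, Int.gcd_comm]

-- combined: pvTrial matches find? over [d, m]
theorem pv_trial_find (C : Int → Bool) (g : Int) (hCiff : ∀ i, C i = true ↔ i ∣ g)
    (hg : 2 ≤ g) (m : Int) (hgm : g ≤ m) (d : Int) (hd : 2 ≤ d) (hdg : d ≤ g)
    (hfail : ∀ i, 2 ≤ i → i < d → ¬ i ∣ g) :
    pvTrial g d = ((PySem.List.pyRange d (m + 1) 1).find? C, some g) := by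
  have hk : (g - d).toNat = (g - d).toNat := rfl
  generalize hgen : (g - d).toNat = k at hk
  clear hk
  induction k using Nat.strong_induction_on generalizing d with
  | _ k ih =>
    rw [pvTrial]
    by_cases hsq : d * d ≤ g
    · rw [dif_pos hsq]
      by_cases hdvd : PySem.Int.mod g d = 0
      · rw [if_pos hdvd]
        have hdg' : d ∣ g := (PySem.Int.mod_eq_zero_iff_dvd g d).mp hdvd
        have hCd : C d = true := (hCiff d).mpr hdg'
        rw [pv_find_asc C m d (by omega) hCd d le_rfl (fun i h1 h2 => by omega)]
      · rw [if_neg hdvd]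
        have hnd : ¬ d ∣ g := fun hdd => hdvd ((PySem.Int.mod_eq_zero_iff_dvd g d).mpr hdd)
        have hstep : 2 * d ≤ d * d := by nlinarith
        have hd1 : d + 1 ≤ g := by omega
        rw [ih (g - (d + 1)).toNat (by omega) (d + 1) (by omega) (by omega)
            (fun i h1 h2 => by
              by_cases hi : i < d
              · exact hfail i h1 hi
              · have : i = d := by omega
                subst this; exact hnd) rfl]
        rw [PySem.List.pyRange_one_cons (show d < m + 1 by omega)]
        have hCd : C d = false := by
          have := hCiff d
          by_cases hc : C d = true
          · exact absurd (this.mp hc) hnd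
          · simpa using hc
        rw [List.find?_cons, hCd]
    · rw [dif_neg hsq]
      have hCg : C g = true := (hCiff g).mpr dvd_rfl
      have hfailg : ∀ i, d ≤ i → i < g → C i = false := by
        intro i h1 h2
        by_cases hc : C i = true
        · exfalso
          have hid : i ∣ g := (hCiff i).mp hc
          obtain ⟨j, hj⟩ := hid
          have hipos : 0 < i := by omega
          have hj1 : 1 < j := by
            by_contra hle
            have hj1' : j ≤ 1 := by omega
            have : i * j ≤ i * 1 := by
              rcases lt_trichotomy j 0 with h' | h' | h'
              · nlinarith
              · simp [h']; nlinarith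
              · have : j = 1 := by omega
                simp [this]
            omega
          have hg_lt : i * j < d * d := by omega
          have hdd_le : d * d ≤ i * d := mul_le_mul_of_nonneg_right h1 (by omega)
          have hj_lt : i * j < i * d := by
            calc i * j < d * d := hg_lt
              _ ≤ i * d := hdd_le
          have hjd : j < d := lt_of_mul_lt_mul_left hj_lt (by omega)
          have hjdvd : j ∣ g := ⟨i, by rw [hj]; ring⟩
          exact hfail j (by omega) hjd hjdvd
        · simpa using hc
      rw [pv_find_asc C m g hgm hCg d hdg hfailg]

-- ===== VERDICT (by name: the statement is the Claim_ definition above) =====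
theorem chercheDiviseursExtremes_spec : Claim_equal_chercheDiviseursExtremes := by
  intro n1 n2 _
  unfold Spec_chercheDiviseursExtremes chercheDiviseursExtremes chercheDiviseursExtremes_alt
  set C : Int → Bool := fun i => decide (PySem.Int.mod n1 i = 0 ∧ PySem.Int.mod n2 i = 0) with hCdef
  by_cases hm : min n1 n2 < 2
  · rw [if_pos hm]
    rw [PySem.List.pyRange_one_eq_nil (by omega)]
    simp
  · rw [if_neg hm]
    have hn1 : 2 ≤ n1 := by omega
    have hn2 : 2 ≤ n2 := by omega
    have hmin : 2 ≤ min n1 n2 := by omega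
    set G : Int := (Int.gcd n1 n2 : Int) with hGdef
    have hEu : pvEuclid n1 n2 = G := pv_euclid_eq_gcd n1 n2 (by omega) (by omega)
    have hG1 : 1 ≤ G := by
      have : G ∣ n1 := Int.gcd_dvd_left _ _
      have hGnn : 0 ≤ G := Int.natCast_nonneg _
      rcases this with ⟨c, hc⟩
      by_contra h
      have : G = 0 := by omega
      rw [this] at hc; omega
    have hGn1 : G ∣ n1 := Int.gcd_dvd_left _ _
    have hGle : G ≤ min n1 n2 := by
      have h1 : G ≤ n1 := Int.le_of_dvd (by omega) hGn1
      have h2 : G ≤ n2 := Int.le_of_dvd (by omega) (Int.gcd_dvd_right _ _)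
      omega
    have hCiff : ∀ i, C i = true ↔ i ∣ G := by
      intro i
      rw [hCdef]
      simp only [decide_eq_true_eq]
      rw [PySem.Int.mod_eq_zero_iff_dvd, PySem.Int.mod_eq_zero_iff_dvd]
      exact (pv_dvd_gcd_iff n1 n2 i).symm
    have hfold := pv_foldA_char n1 n2 (PySem.List.pyRange 2 (min n1 n2 + 1) 1)
      (PySem.List.pairwise_lt_pyRange_one 2 (min n1 n2 + 1))
    rw [← hCdef] at hfold
    rw [hEu]
    by_cases hGone : G = 1
    · rw [if_pos hGone]
      have hnone : ∀ x ∈ PySem.List.pyRange 2 (min n1 n2 + 1) 1, ¬ C x = true := by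
        intro x hx
        have hx2 : 2 ≤ x := (PySem.List.mem_pyRange_one.mp hx).1
        intro hc
        have : x ∣ G := (hCiff x).mp hc
        rw [hGone] at this
        have := Int.le_of_dvd (by omega) this
        omega
      have hfn : (PySem.List.pyRange 2 (min n1 n2 + 1) 1).find? C = none :=
        List.find?_eq_none.mpr hnone
      have hfn' : (PySem.List.pyRange 2 (min n1 n2 + 1) 1).reverse.find? C = none :=
        List.find?_eq_none.mpr (fun x hx => hnone x (by simpa using hx))
      simp only [hfold, hfn, hfn']
    · rw [if_neg hGone]
      have hG2 : 2 ≤ G := by omega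
      have htr := pv_trial_find C G hCiff hG2 (min n1 n2) hGle 2 le_rfl hG2
        (fun i h1 h2 => by omega)
      have hrev : PySem.List.pyRange (min n1 n2) 1 (-1) = (PySem.List.pyRange 2 (min n1 n2 + 1) 1).reverse := by
        rw [PySem.List.pyRange_neg_one_eq_reverse]
        norm_num
      have hdesc : (PySem.List.pyRange 2 (min n1 n2 + 1) 1).reverse.find? C = some G := by
        rw [← hrev]
        exact pv_find_desc C G (by omega) ((hCiff G).mpr dvd_rfl) (min n1 n2) hGle
          (fun i h1 h2 => by
            by_cases hc : C i = true
            · exfalso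
              have := Int.le_of_dvd (by omega) ((hCiff i).mp hc)
              omega
            · simpa using hc)
      simp only [hfold, hdesc, htr]
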